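-- pv_equiv track=rewrite | github.com/WindzJC/leadautomation | verify_emails.py | is_hard_block_role
-- ===== SOURCE A (Python) =====
-- HARD_BLOCK_ROLE_LOCALPARTS = {
--     "abuse",
--     "postmaster",
--     "noreply",
--     "no-reply",
--     "donotreply",
--     "do-not-reply",
-- }
--
-- def local_from_email(email: str) -> str:
--     local, _, _ = email.partition("@")
--     return local.strip().lower()
--
-- def is_hard_block_role(email: str) -> bool:
--     local = local_from_email(email)
--     if local in HARD_BLOCK_ROLE_LOCALPARTS:
--         return True
--     for role in HARD_BLOCK_ROLE_LOCALPARTS: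
--         if local.startswith(role) and len(local) > len(role):
--             sep = local[len(role)]
--             if sep in {".", "-", "_", "+"}:
--                 return True
--     return False
-- ===== SOURCE B (Python) =====
-- HARD_BLOCK_ROLE_LOCALPARTS = {
--     "abuse",
--     "postmaster",
--     "noreply",
--     "no-reply",
--     "donotreply",
--     "do-not-reply",
-- }
--
-- _SEPS = "._+-"
--
-- def is_hard_block_role(email: str) -> bool:
--     local = email.partition("@")[0].strip().lower()
--     if local in HARD_BLOCK_ROLE_LOCALPARTS:
--         return True
--     return any(ch in _SEPS and local[:k] in HARD_BLOCK_ROLE_LOCALPARTS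
--                for k, ch in enumerate(local))
-- ===== Notes on version B (the rewrite author's own statement) =====
-- stated objective: alternative
-- what changed: B replaces A's loop over the six role strings (startswith plus separator-character test per role) by a single enumerate scan over the local-part's characters that, at each separator character, checks whether the prefix before it is a blocked role (set lookup), plus the same bare-membership check; same asymptotic cost, different traversal.
import Mathlib
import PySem

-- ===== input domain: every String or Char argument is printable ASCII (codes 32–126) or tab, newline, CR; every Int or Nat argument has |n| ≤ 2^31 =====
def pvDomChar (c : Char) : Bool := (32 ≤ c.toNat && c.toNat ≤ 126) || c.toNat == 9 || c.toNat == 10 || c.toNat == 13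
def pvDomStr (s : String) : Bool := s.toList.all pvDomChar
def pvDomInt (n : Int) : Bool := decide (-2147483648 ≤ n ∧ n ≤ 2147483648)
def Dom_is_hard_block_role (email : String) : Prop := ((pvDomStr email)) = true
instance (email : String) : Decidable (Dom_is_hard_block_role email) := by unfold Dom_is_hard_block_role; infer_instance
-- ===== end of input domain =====

-- B replaces A's loop over the six role strings (startswith + separator test) by a single
-- scan of the local-part's characters, checking at each separator character whether the
-- prefix before it is a blocked role; objective: alternative (same cost, different traversal).

-- shared module context: HARD_BLOCK_ROLE_LOCALPARTS and the separator set
def pvRoles : List (List Char) :=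
  ["abuse".toList, "postmaster".toList, "noreply".toList,
   "no-reply".toList, "donotreply".toList, "do-not-reply".toList]
def pvSeps : List Char := ['.', '-', '_', '+']

-- local_from_email: email.partition("@")[0].strip().lower()  (partition's first component
-- is ported by hand as takeWhile (· ≠ '@'), exact: the characters before the first '@')
def local_from_email (email : String) : List Char :=
  PySem.Chars.lower (PySem.Chars.strip (email.toList.takeWhile (fun c => c ≠ '@')))

-- ===== PORT A =====
def is_hard_block_role (email : String) : Bool :=
  let lc := local_from_email email
  if lc ∈ pvRoles then true
  else
    -- for role in HARD_BLOCK_ROLE_LOCALPARTS: early-return-true loop = List.any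
    pvRoles.any (fun role =>
      PySem.Chars.startswith lc role && decide (role.length < lc.length) &&
      ((PySem.List.pyGet? lc (role.length : Int)).elim false (fun sep => sep ∈ pvSeps)))

-- ===== PORT B =====
def is_hard_block_role_alt (email : String) : Bool :=
  let lc := local_from_email email
  decide (lc ∈ pvRoles) ||
    (PySem.List.enumerate lc).any (fun p =>
      p.2 ∈ pvSeps && PySem.List.slice lc none (some p.1) ∈ pvRoles)

-- ===== PRECONDITION & SPEC =====
def Spec_is_hard_block_role (email : String) (out : Bool) : Prop := out = is_hard_block_role_alt email
instance (email : String) (out : Bool) : Decidable (Spec_is_hard_block_role email out) := by unfold Spec_is_hard_block_role; infer_instance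

-- ===== CLAIM (what is proved, stated in full; the proofs are below) =====
def Claim_equal_is_hard_block_role : Prop := ∀ (email : String), Dom_is_hard_block_role email → Spec_is_hard_block_role email (is_hard_block_role email)

-- ===== LEMMAS AND PROOFS =====

-- the two loops agree on every local-part
theorem pv_loop_eq (l : List Char) :
    pvRoles.any (fun role =>
      PySem.Chars.startswith l role && decide (role.length < l.length) &&
      ((PySem.List.pyGet? l (role.length : Int)).elim false (fun sep => sep ∈ pvSeps)))
    = (PySem.List.enumerate l).any (fun p =>
      p.2 ∈ pvSeps && PySem.List.slice l none (some p.1) ∈ pvRoles) := by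
  rw [Bool.eq_iff_iff]
  simp only [List.any_eq_true, Bool.and_eq_true, decide_eq_true_eq,
    PySem.List.mem_enumerate_iff, PySem.Chars.startswith_iff]
  constructor
  · rintro ⟨role, hrole, ⟨hpre, hlt⟩, hsep⟩
    rw [PySem.List.pyGet?_natCast] at hsep
    rw [List.getElem?_eq_getElem hlt] at hsep
    simp only [Option.elim_some] at hsep
    refine ⟨((role.length : Int), l[role.length]), ⟨role.length, hlt, by simp⟩, by simpa using hsep, ?_⟩
    rw [PySem.List.slice_to_natCast]
    rw [List.prefix_iff_eq_take] at hpre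
    rw [← hpre]; exact hrole
  · rintro ⟨p, ⟨k, hk, hp⟩, hsep, hmem⟩
    subst hp
    simp only [zero_add] at hsep hmem ⊢
    rw [PySem.List.slice_to_natCast] at hmem
    refine ⟨l.take k, hmem, ⟨List.take_prefix k l, ?_⟩, ?_⟩
    · rw [List.length_take]; omega
    · have hlen : (l.take k).length = k := by rw [List.length_take]; omega
      rw [hlen, PySem.List.pyGet?_natCast, List.getElem?_eq_getElem hk]
      simpa using hsep

-- ===== VERDICT (by name: the statement is the Claim_ definition above) =====
theorem is_hard_block_role_spec : Claim_equal_is_hard_block_role := by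
  intro email _
  simp only [Spec_is_hard_block_role, is_hard_block_role, is_hard_block_role_alt]
  by_cases h : local_from_email email ∈ pvRoles
  · rw [if_pos h]; simp [h]
  · rw [if_neg h, pv_loop_eq]; simp [h]
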